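-- pv_equiv track=rewrite | github.com/nicknguyen0201/Image-of-handwriting-to-docx | parse_recognized_csv.py | parse_trocr_recognized_words
-- ===== SOURCE A (Python) =====
-- def parse_trocr_recognized_words(rows: list[dict[str, str]]) -> dict[str, str]:
--     """Parse rows from TrOCR recognized_words.csv into {image_stem: joined_text}."""
--     items: list[tuple[str, int, str]] = []
--     for r in rows:
--         stem = (r.get("image_stem") or "").strip()
--         if not stem:
--             continue
--         idx_str = (r.get("index") or "0").strip()
--         try:
--             idx = int(idx_str)
--         except ValueError:
--             idx = 0
--         text = (r.get("text") or "").strip()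
--         items.append((stem, idx, text))
--
--     items.sort(key=lambda t: (t[0], t[1]))
--
--     out: dict[str, list[str]] = {}
--     for stem, _idx, text in items:
--         if stem not in out:
--             out[stem] = []
--         if text:
--             out[stem].append(text)
--
--     return {stem: " ".join(parts).strip() for stem, parts in out.items()}
-- ===== SOURCE B (Python) =====
-- def parse_trocr_recognized_words(rows: list[dict[str, str]]) -> dict[str, str]:
--     """Parse rows from TrOCR recognized_words.csv into {image_stem: joined_text}."""
--     groups: dict[str, list[tuple[int, str]]] = {}
--     for r in rows:
--         stem = (r.get("image_stem") or "").strip()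
--         if not stem:
--             continue
--         idx_str = (r.get("index") or "0").strip()
--         try:
--             idx = int(idx_str)
--         except ValueError:
--             idx = 0
--         groups.setdefault(stem, []).append((idx, (r.get("text") or "").strip()))
--
--     result: dict[str, str] = {}
--     for stem in sorted(groups):
--         pairs = sorted(groups[stem], key=lambda p: p[0])
--         result[stem] = " ".join(t for _, t in pairs if t).strip()
--     return result
-- ===== Notes on version B (the rewrite author's own statement) =====
-- stated objective: alternative
-- what changed: Instead of building one flat item list, sorting it globally by (stem, index) and then grouping through a dict of lists, B groups rows by stem in a single pass (appending (index, text) per stem), then emits output by iterating the sorted keys and stably sorting each group by index on its own.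
import Mathlib
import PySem

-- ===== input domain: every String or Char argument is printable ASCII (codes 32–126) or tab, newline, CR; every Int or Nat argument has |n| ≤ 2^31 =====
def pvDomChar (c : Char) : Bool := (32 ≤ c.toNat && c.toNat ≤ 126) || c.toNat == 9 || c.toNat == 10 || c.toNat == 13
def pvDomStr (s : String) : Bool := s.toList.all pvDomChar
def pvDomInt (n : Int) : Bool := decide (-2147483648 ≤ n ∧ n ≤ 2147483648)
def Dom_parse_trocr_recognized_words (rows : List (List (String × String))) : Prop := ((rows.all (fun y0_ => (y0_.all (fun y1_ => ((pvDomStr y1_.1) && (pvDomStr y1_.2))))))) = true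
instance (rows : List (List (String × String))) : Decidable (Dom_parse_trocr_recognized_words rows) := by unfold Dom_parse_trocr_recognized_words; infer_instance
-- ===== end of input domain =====

-- B groups rows by stem in one pass and sorts keys and each group's (index, text) pairs separately,
-- instead of A's global sort of a flat (stem, index, text) list followed by dict grouping (alternative decomposition, same cost).


-- ===== PORT A =====
-- literal port of A: parse each row dict into (stem, idx, text), sort the flat list by (stem, idx),
-- then group into a dict of text lists and join.
def parse_trocr_recognized_words (rows : List (List (String × String))) : List (String × String) :=
  let items : List (String × Int × String) := rows.foldl (fun acc r =>
    let stem := PySem.Str.strip (PySem.Dict.getD ⟨r⟩ "image_stem" "")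
    if stem = "" then acc
    else
      let v := PySem.Dict.getD (⟨r⟩ : PySem.Dict String String) "index" ""
      let idx_str := PySem.Str.strip (if v = "" then "0" else v)
      let idx := (PySem.Int.ofStr? idx_str).getD 0
      let text := PySem.Str.strip (PySem.Dict.getD (⟨r⟩ : PySem.Dict String String) "text" "")
      acc ++ [(stem, idx, text)]) []
  let s := PySem.List.sorted2 items (fun t => t.1) (fun t => t.2.1)
  let out : PySem.Dict String (List String) := s.foldl (fun d t =>
    let d1 := if d.contains t.1 then d else d.insert t.1 []
    if t.2.2 ≠ "" then d1.modify t.1 [] (fun l => l ++ [t.2.2]) else d1) PySem.Dict.empty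
  out.items.map (fun p => (p.1, PySem.Str.strip (PySem.Str.join " " p.2)))

-- ===== PORT B =====
-- literal port of B: one grouping pass rows → dict stem ↦ [(idx, text)], then sorted keys,
-- per-group stable sort by idx, filter empty texts, join.
def parse_trocr_recognized_words_alt (rows : List (List (String × String))) : List (String × String) :=
  let groups : PySem.Dict String (List (Int × String)) := rows.foldl (fun d r =>
    let stem := PySem.Str.strip (PySem.Dict.getD ⟨r⟩ "image_stem" "")
    if stem = "" then d
    else
      let v := PySem.Dict.getD (⟨r⟩ : PySem.Dict String String) "index" ""
      let idx_str := PySem.Str.strip (if v = "" then "0" else v)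
      let idx := (PySem.Int.ofStr? idx_str).getD 0
      let text := PySem.Str.strip (PySem.Dict.getD (⟨r⟩ : PySem.Dict String String) "text" "")
      d.modify stem [] (fun l => l ++ [(idx, text)])) PySem.Dict.empty
  (PySem.List.sorted groups.keys (fun k => k)).map (fun k =>
    let pairs := PySem.List.sorted (groups.getD k []) (fun p => p.1)
    (k, PySem.Str.strip (PySem.Str.join " " ((pairs.filter (fun p => p.2 ≠ "")).map (fun p => p.2)))))

-- ===== PRECONDITION & SPEC =====
def Spec_parse_trocr_recognized_words (rows : List (List (String × String))) (out : List (String × String)) : Prop := out = parse_trocr_recognized_words_alt rows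
instance (rows : List (List (String × String))) (out : List (String × String)) : Decidable (Spec_parse_trocr_recognized_words rows out) := by unfold Spec_parse_trocr_recognized_words; infer_instance

-- ===== CLAIM (what is proved, stated in full; the proofs are below) =====
def Claim_equal_parse_trocr_recognized_words : Prop := ∀ (rows : List (List (String × String))), Dom_parse_trocr_recognized_words rows → Spec_parse_trocr_recognized_words rows (parse_trocr_recognized_words rows)

-- ===== LEMMAS AND PROOFS =====

def pvLt2 (a b : String × Int × String) : Bool :=
  decide (a.1 < b.1) || (!decide (b.1 < a.1) && decide (a.2.1 < b.2.1))

theorem pvLt2_iff (a b : String × Int × String) :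
    pvLt2 a b = true ↔ (a.1 < b.1 ∨ (a.1 = b.1 ∧ a.2.1 < b.2.1)) := by
  unfold pvLt2
  rcases lt_trichotomy a.1 b.1 with h | h | h
  · simp [h]
  · simp [h, lt_irrefl]
  · simp [not_lt_of_gt h, h, (ne_of_gt h)]

theorem pvLt2_asymm (a b : String × Int × String) (h : pvLt2 a b = true) : pvLt2 b a = false := by
  rw [Bool.eq_false_iff, Ne, pvLt2_iff]
  rw [pvLt2_iff] at h
  push_neg
  rcases h with h | ⟨e, i⟩
  · exact ⟨le_of_lt h, fun e' => absurd (e' ▸ h) (lt_irrefl _)⟩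
  · exact ⟨le_of_eq e, fun _ => le_of_lt i⟩

theorem pvLt2_trans (a b c : String × Int × String) (h1 : pvLt2 a b = true)
    (h2 : pvLt2 b c = true) : pvLt2 a c = true := by
  rw [pvLt2_iff] at *
  rcases h1 with h1 | ⟨e1, i1⟩ <;> rcases h2 with h2 | ⟨e2, i2⟩
  · exact Or.inl (lt_trans h1 h2)
  · exact Or.inl (e2 ▸ h1)
  · exact Or.inl (e1 ▸ h2)
  · exact Or.inr ⟨e1.trans e2, lt_trans i1 i2⟩

theorem pvLt2_comp (a b c : String × Int × String) (h1 : pvLt2 a b = true)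
    (h2 : pvLt2 c b = false) : pvLt2 a c = true := by
  rw [Bool.eq_false_iff, Ne, pvLt2_iff] at h2
  push_neg at h2
  rw [pvLt2_iff] at h1 ⊢
  obtain ⟨hcb, hcb2⟩ := h2
  rcases h1 with h1 | ⟨e1, i1⟩
  · exact Or.inl (lt_of_lt_of_le h1 (not_lt.mp hcb))
  · rcases lt_or_eq_of_le (not_lt.mp hcb) with h | h
    · exact Or.inl (e1 ▸ h)
    · exact Or.inr ⟨e1.trans h, lt_of_lt_of_le i1 (hcb2 h.symm)⟩
theorem pvInsertBy_nil {α : Type} (lt : α → α → Bool) (x : α) :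
    PySem.List.insertBy lt x [] = [x] := rfl

theorem pvInsertBy_cons {α : Type} (lt : α → α → Bool) (x y : α) (t : List α) :
    PySem.List.insertBy lt x (y :: t) =
      if lt x y then x :: y :: t else y :: PySem.List.insertBy lt x t := rfl

-- inserting into a lt-sorted list keeps it lt-sorted
theorem pvInsertBy_pairwise {α : Type} (lt : α → α → Bool)
    (hasym : ∀ a b, lt a b = true → lt b a = false)
    (htrans : ∀ a b c, lt a b = true → lt b c = true → lt a c = true)
    (x : α) (ys : List α) (h : ys.Pairwise (fun a b => lt b a = false)) :
    (PySem.List.insertBy lt x ys).Pairwise (fun a b => lt b a = false) := by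
  induction ys with
  | nil => simp [pvInsertBy_nil]
  | cons y t ih =>
    rw [List.pairwise_cons] at h
    obtain ⟨hy, ht⟩ := h
    rw [pvInsertBy_cons]
    by_cases hxy : lt x y = true
    · simp only [hxy, if_true]
      refine List.Pairwise.cons ?_ (List.Pairwise.cons hy ht)
      intro z hz
      rcases List.mem_cons.mp hz with rfl | hz
      · exact hasym _ _ hxy
      · by_contra hc
        rw [Bool.not_eq_false] at hc
        have := htrans _ _ _ hc hxy
        rw [hy z hz] at this
        exact Bool.false_ne_true this
    · rw [Bool.not_eq_true] at hxy
      simp only [hxy, Bool.false_eq_true, if_false]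
      refine List.Pairwise.cons ?_ (ih ht)
      intro z hz
      rw [PySem.List.insertBy_mem_iff] at hz
      rcases hz with rfl | hz
      · exact hxy
      · exact hy z hz

-- filtering out the inserted element
theorem pvFilter_insertBy_neg {α : Type} (lt : α → α → Bool) (p : α → Bool)
    (x : α) (ys : List α) (hx : p x = false) :
    (PySem.List.insertBy lt x ys).filter p = ys.filter p := by
  induction ys with
  | nil => simp [pvInsertBy_nil, hx]
  | cons y t ih =>
    rw [pvInsertBy_cons]
    by_cases hxy : lt x y = true
    · simp [hxy, hx]
    · rw [Bool.not_eq_true] at hxy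
      simp only [hxy, Bool.false_eq_true, if_false, List.filter_cons]
      rw [ih]

-- insert at the front when x goes before the head (or list empty)
theorem pvInsertBy_front {α : Type} (lt : α → α → Bool) (x : α) (l : List α)
    (h : ∀ z ∈ l, lt x z = true) : PySem.List.insertBy lt x l = x :: l := by
  cases l with
  | nil => rfl
  | cons z t => rw [pvInsertBy_cons, h z (by simp)]; simp

-- filter commutes with inserting a kept element into a sorted list
theorem pvFilter_insertBy_pos {α : Type} (lt : α → α → Bool) (p : α → Bool)
    (hcomp : ∀ a b c, lt a b = true → lt c b = false → lt a c = true)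
    (x : α) (ys : List α) (hx : p x = true)
    (hs : ys.Pairwise (fun a b => lt b a = false)) :
    (PySem.List.insertBy lt x ys).filter p = PySem.List.insertBy lt x (ys.filter p) := by
  induction ys with
  | nil => simp [pvInsertBy_nil, hx]
  | cons y t ih =>
    rw [List.pairwise_cons] at hs
    obtain ⟨hy, ht⟩ := hs
    rw [pvInsertBy_cons]
    by_cases hxy : lt x y = true
    · simp only [hxy, if_true, List.filter_cons, hx, if_true]
      by_cases hpy : p y = true
      · simp only [hpy, if_true]
        rw [pvInsertBy_cons, hxy]
        simp
      · rw [Bool.not_eq_true] at hpy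
        simp only [hpy, Bool.false_eq_true, if_false]
        rw [pvInsertBy_front]
        intro z hz
        have hzt : z ∈ t := List.mem_of_mem_filter hz
        exact hcomp _ _ _ hxy (hy z hzt)
    · rw [Bool.not_eq_true] at hxy
      simp only [hxy, Bool.false_eq_true, if_false, List.filter_cons]
      by_cases hpy : p y = true
      · simp only [hpy, if_true]
        rw [pvInsertBy_cons, hxy]
        simp only [Bool.false_eq_true, if_false]
        rw [ih ht]
      · rw [Bool.not_eq_true] at hpy
        simp only [hpy, Bool.false_eq_true, if_false]
        exact ih ht

-- filter commutes with the whole insertion-sort fold (generic, with sortedness invariant)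
theorem pvFilter_foldl_insertBy {α : Type} (lt : α → α → Bool) (p : α → Bool)
    (hf_neg : ∀ x ys, p x = false →
      (PySem.List.insertBy lt x ys).filter p = ys.filter p)
    (hf_pos : ∀ x ys, p x = true → ys.Pairwise (fun a b => lt b a = false) →
      (PySem.List.insertBy lt x ys).filter p = PySem.List.insertBy lt x (ys.filter p))
    (hpw : ∀ x ys, ys.Pairwise (fun a b => lt b a = false) →
      (PySem.List.insertBy lt x ys).Pairwise (fun a b => lt b a = false))
    (l : List α) : ∀ acc : List α, acc.Pairwise (fun a b => lt b a = false) →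
    (l.foldl (fun acc x => PySem.List.insertBy lt x acc) acc).filter p =
      (l.filter p).foldl (fun acc x => PySem.List.insertBy lt x acc) (acc.filter p) := by
  induction l with
  | nil => intro acc h; rfl
  | cons x t ih =>
    intro acc h
    rw [List.foldl_cons, List.filter_cons]
    by_cases hx : p x = true
    · simp only [hx, if_true, List.foldl_cons]
      rw [ih _ (hpw x acc h), hf_pos x acc hx h]
    · rw [Bool.not_eq_true] at hx
      simp only [hx, Bool.false_eq_true, if_false]
      rw [ih _ (hpw x acc h), hf_neg x acc hx]

-- congruence: two before-relations agreeing on (inserted, resident) pairs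
theorem pvInsertBy_congr {α : Type} (lt lt' : α → α → Bool) (x : α) (ys : List α)
    (h : ∀ y ∈ ys, lt x y = lt' x y) :
    PySem.List.insertBy lt x ys = PySem.List.insertBy lt' x ys := by
  induction ys with
  | nil => rfl
  | cons y t ih =>
    rw [pvInsertBy_cons, pvInsertBy_cons, h y (by simp)]
    by_cases hxy : lt' x y = true
    · simp [hxy]
    · rw [Bool.not_eq_true] at hxy
      simp only [hxy, Bool.false_eq_true, if_false]
      rw [ih (fun y hy => h y (by simp [hy]))]

-- map commute at insertBy level
theorem pvInsertBy_map {α β : Type} (ltα : α → α → Bool) (ltβ : β → β → Bool) (f : α → β)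
    (h : ∀ a b, ltβ (f a) (f b) = ltα a b) (x : α) (ys : List α) :
    PySem.List.insertBy ltβ (f x) (ys.map f) = (PySem.List.insertBy ltα x ys).map f := by
  induction ys with
  | nil => rfl
  | cons y t ih =>
    rw [List.map_cons, pvInsertBy_cons, pvInsertBy_cons, h]
    by_cases hxy : ltα x y = true
    · simp [hxy]
    · rw [Bool.not_eq_true] at hxy
      simp only [hxy, Bool.false_eq_true, if_false, List.map_cons]
      rw [ih]

theorem pvFoldl_insertBy_map {α β : Type} (ltα : α → α → Bool) (ltβ : β → β → Bool) (f : α → β)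
    (h : ∀ a b, ltβ (f a) (f b) = ltα a b) (l : List α) : ∀ acc : List α,
    (l.map f).foldl (fun acc x => PySem.List.insertBy ltβ x acc) (acc.map f) =
      (l.foldl (fun acc x => PySem.List.insertBy ltα x acc) acc).map f := by
  induction l with
  | nil => intro acc; rfl
  | cons y t ih =>
    intro acc
    rw [List.map_cons, List.foldl_cons, List.foldl_cons, pvInsertBy_map ltα ltβ f h y acc]
    exact ih _

-- dedup (= Set.ofList) is a sublist
theorem pvFoldl_add_sublist {α : Type} [BEq α] (l : List α) : ∀ (acc ys : List α),
    acc.Sublist ys → (l.foldl PySem.Set.add acc).Sublist (ys ++ l) := by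
  induction l with
  | nil => intro acc ys h; simpa using h
  | cons x t ih =>
    intro acc ys h
    rw [List.foldl_cons]
    have step : (PySem.Set.add acc x).Sublist (ys ++ [x]) := by
      show (if acc.contains x then acc else acc ++ [x]).Sublist (ys ++ [x])
      by_cases hc : acc.contains x = true
      · simp only [hc, if_true]
        exact h.trans (List.sublist_append_left ys [x])
      · rw [Bool.not_eq_true] at hc
        simp only [hc, Bool.false_eq_true, if_false]
        exact h.append (List.Sublist.refl [x])
    have := ih (PySem.Set.add acc x) (ys ++ [x]) step
    simpa [List.append_assoc] using this

theorem pvDedup_sublist {α : Type} [BEq α] (l : List α) : (PySem.List.dedup l).Sublist l := by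
  have := pvFoldl_add_sublist l [] [] (List.Sublist.refl [])
  simpa using this

theorem pvInsert_self_eq {ν : Type} (d : PySem.Dict String ν) (k : String) (d0 : ν)
    (hc : d.contains k = true) (hnd : d.keys.Nodup) : d.insert k (d.getD k d0) = d := by
  show (if d.contains k = true then PySem.Dict.mk (d.items.map (fun p => if (p.1 == k) = true then (k, d.getD k d0) else p)) else PySem.Dict.mk (d.items ++ [(k, d.getD k d0)])) = d
  rw [if_pos hc]
  have : ∀ p ∈ d.items, (if (p.1 == k) = true then (k, d.getD k d0) else p) = id p := by
    intro p hp
    by_cases h : (p.1 == k) = true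
    · have hk : p.1 = k := by simpa using h
      have hpmem : (k, p.2) ∈ d.items := by rw [← hk]; exact hp
      have hv := PySem.Dict.getD_of_mem_items d hpmem hnd d0
      rw [if_pos h, hv]
      cases p
      simp_all
    · simp [h]
  rw [List.map_congr_left this, List.map_id]

def pvGA (t : String × Int × String) : List String := if t.2.2 ≠ "" then [t.2.2] else []

theorem pvStepA_eq (d : PySem.Dict String (List String)) (t : String × Int × String)
    (hnd : d.keys.Nodup) :
    (let d1 := if d.contains t.1 then d else d.insert t.1 []
     if t.2.2 ≠ "" then d1.modify t.1 [] (fun l => l ++ [t.2.2]) else d1) =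
      d.modify t.1 [] (fun l => l ++ pvGA t) := by
  show (if t.2.2 ≠ "" then (if d.contains t.1 = true then d else d.insert t.1 []).modify t.1 [] (fun l => l ++ [t.2.2]) else (if d.contains t.1 = true then d else d.insert t.1 [])) = d.modify t.1 [] (fun l => l ++ pvGA t)
  rcases Bool.eq_false_or_eq_true (d.contains t.1) with hc | hc <;>
    by_cases ht : t.2.2 ≠ "" <;>
    simp only [pvGA, hc, if_pos ht, if_neg ht, if_true, if_false, ite_true, ite_false,
      Bool.false_eq_true, PySem.Dict.modify] <;>
    first
    | rw [PySem.Dict.getD_insert_self, PySem.Dict.insert_insert_self,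
        PySem.Dict.getD_of_not_contains d [] hc]
    | rw [PySem.Dict.getD_of_not_contains d [] hc, List.append_nil]
    | rfl
    | rw [List.append_nil, pvInsert_self_eq d t.1 [] hc hnd]

-- getD of a grouping fold (generic contribution g)
theorem pvGetD_foldl_modify {T β : Type} (keyf : T → String) (g : T → List β)
    (l : List T) : ∀ (d : PySem.Dict String (List β)) (c : String),
    (l.foldl (fun d t => d.modify (keyf t) [] (fun v => v ++ g t)) d).getD c [] =
      d.getD c [] ++ (l.filter (fun t => keyf t == c)).flatMap g := by
  induction l with
  | nil => intro d c; simp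
  | cons t ts ih =>
    intro d c
    rw [List.foldl_cons, ih, PySem.Dict.getD_modify, List.filter_cons]
    by_cases h : keyf t = c
    · subst h
      simp
    · have hb : (keyf t == c) = false := by simpa using h
      rw [if_neg (fun hcc : c = keyf t => h hcc.symm), hb]
      simp

-- keys of a grouping fold from empty = dedup of the mapped keys
theorem pvKeys_foldl_modify {T β : Type} (keyf : T → String) (g : T → List β) (l : List T) :
    (l.foldl (fun d t => d.modify (keyf t) [] (fun v => v ++ g t)) PySem.Dict.empty).keys =
      PySem.List.dedup (l.map keyf) := by
  have := PySem.Dict.keys_foldl_modify_key l keyf [] (fun _ t => (fun v => v ++ g t)) PySem.Dict.empty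
  simpa using this

theorem pvNodup_keys_foldl_modify {T β : Type} (keyf : T → String) (g : T → List β) (l : List T)
    (d : PySem.Dict String (List β)) (h : d.keys.Nodup) :
    (l.foldl (fun d t => d.modify (keyf t) [] (fun v => v ++ g t)) d).keys.Nodup :=
  PySem.Dict.nodup_keys_foldl_modify_key l keyf [] (fun _ t => (fun v => v ++ g t)) d h

-- shared row parser: what one row of either port contributes to the item list
def pvRow (r : List (String × String)) : Option (String × Int × String) :=
  let stem := PySem.Str.strip (PySem.Dict.getD ⟨r⟩ "image_stem" "")
  if stem = "" then none
  else
    let v := PySem.Dict.getD (⟨r⟩ : PySem.Dict String String) "index" ""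
    let idx_str := PySem.Str.strip (if v = "" then "0" else v)
    let idx := (PySem.Int.ofStr? idx_str).getD 0
    let text := PySem.Str.strip (PySem.Dict.getD (⟨r⟩ : PySem.Dict String String) "text" "")
    some (stem, idx, text)

theorem pvStepItems_eq (acc : List (String × Int × String)) (r : List (String × String)) :
    (let stem := PySem.Str.strip (PySem.Dict.getD ⟨r⟩ "image_stem" "")
     if stem = "" then acc
     else
       let v := PySem.Dict.getD (⟨r⟩ : PySem.Dict String String) "index" ""
       let idx_str := PySem.Str.strip (if v = "" then "0" else v)
       let idx := (PySem.Int.ofStr? idx_str).getD 0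
       let text := PySem.Str.strip (PySem.Dict.getD (⟨r⟩ : PySem.Dict String String) "text" "")
       acc ++ [(stem, idx, text)]) = acc ++ (pvRow r).toList := by
  unfold pvRow
  dsimp only
  split_ifs <;> simp

theorem pvFoldl_toList_eq_filterMap {R I : Type} (f : R → Option I) (rows : List R) :
    ∀ acc : List I, rows.foldl (fun acc r => acc ++ (f r).toList) acc = acc ++ rows.filterMap f := by
  induction rows with
  | nil => intro acc; simp
  | cons r rs ih =>
    intro acc
    rw [List.foldl_cons, ih, List.filterMap_cons]
    cases f r <;> simp

theorem pvStepB_eq (d : PySem.Dict String (List (Int × String))) (r : List (String × String)) :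
    (let stem := PySem.Str.strip (PySem.Dict.getD ⟨r⟩ "image_stem" "")
     if stem = "" then d
     else
       let v := PySem.Dict.getD (⟨r⟩ : PySem.Dict String String) "index" ""
       let idx_str := PySem.Str.strip (if v = "" then "0" else v)
       let idx := (PySem.Int.ofStr? idx_str).getD 0
       let text := PySem.Str.strip (PySem.Dict.getD (⟨r⟩ : PySem.Dict String String) "text" "")
       d.modify stem [] (fun l => l ++ [(idx, text)])) =
    ((pvRow r).elim d (fun t => d.modify t.1 [] (fun l => l ++ [(t.2.1, t.2.2)]))) := by
  unfold pvRow
  dsimp only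
  split_ifs <;> simp

theorem pvFoldl_elim_eq_filterMap {R I D : Type} (f : R → Option I) (g : D → I → D)
    (rows : List R) : ∀ d : D,
    rows.foldl (fun d r => (f r).elim d (fun t => g d t)) d =
      (rows.filterMap f).foldl g d := by
  induction rows with
  | nil => intro d; rfl
  | cons r rs ih =>
    intro d
    rw [List.foldl_cons, List.filterMap_cons]
    cases f r <;> simp [ih]

-- A's dict loop = the plain modify loop, from a nodup-keys start
theorem pvFoldA_eq (l : List (String × Int × String)) :
    ∀ d : PySem.Dict String (List String), d.keys.Nodup →
    l.foldl (fun d t =>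
      let d1 := if d.contains t.1 then d else d.insert t.1 []
      if t.2.2 ≠ "" then d1.modify t.1 [] (fun l => l ++ [t.2.2]) else d1) d =
    l.foldl (fun d t => d.modify t.1 [] (fun v => v ++ pvGA t)) d := by
  induction l with
  | nil => intro d _; rfl
  | cons t ts ih =>
    intro d hnd
    rw [List.foldl_cons, List.foldl_cons]
    have hstep := pvStepA_eq d t hnd
    dsimp only at hstep ⊢
    rw [hstep]
    refine ih _ ?_
    have := pvNodup_keys_foldl_modify (fun t : String × Int × String => t.1) pvGA [t] d hnd
    simpa using this

theorem pvPairwise_foldl_insertBy (l : List (String × Int × String)) :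
    ∀ acc, acc.Pairwise (fun a b => pvLt2 b a = false) →
    (l.foldl (fun acc x => PySem.List.insertBy pvLt2 x acc) acc).Pairwise
      (fun a b => pvLt2 b a = false) := by
  induction l with
  | nil => intro acc h; exact h
  | cons x t ih =>
    intro acc h
    exact ih _ (pvInsertBy_pairwise pvLt2 pvLt2_asymm pvLt2_trans x acc h)

theorem pvLt2_const (a b : String × Int × String) (h : a.1 = b.1) :
    pvLt2 a b = decide (a.2.1 < b.2.1) := by
  unfold pvLt2
  rw [h]
  simp

theorem pvFoldl_class_congr (c : String) (l : List (String × Int × String)) :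
    ∀ acc, (∀ x ∈ l, x.1 = c) → (∀ y ∈ acc, y.1 = c) →
    l.foldl (fun acc x => PySem.List.insertBy pvLt2 x acc) acc =
      l.foldl (fun acc x => PySem.List.insertBy (fun a b => decide (a.2.1 < b.2.1)) x acc) acc := by
  induction l with
  | nil => intro acc _ _; rfl
  | cons x t ih =>
    intro acc hl hacc
    rw [List.foldl_cons, List.foldl_cons,
      pvInsertBy_congr pvLt2 (fun a b => decide (a.2.1 < b.2.1)) x acc
        (fun y hy => pvLt2_const x y ((hl x (by simp)).trans (hacc y hy).symm))]
    refine ih _ (fun z hz => hl z (by simp [hz])) ?_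
    intro y hy
    rw [PySem.List.insertBy_mem_iff] at hy
    rcases hy with rfl | hy
    · exact hl y (by simp)
    · exact hacc y hy

theorem pvDedup_pairwise_lt (l : List String) (h : l.Pairwise (fun a b => a ≤ b)) :
    (PySem.List.dedup l).Pairwise (fun a b => a < b) := by
  have hsub := pvDedup_sublist l
  have hle : (PySem.List.dedup l).Pairwise (fun a b => a ≤ b) := h.sublist hsub
  have hne : (PySem.List.dedup l).Pairwise (fun a b => a ≠ b) := PySem.List.nodup_dedup l
  exact (hle.and hne).imp (fun h => lt_of_le_of_ne h.1 h.2)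

theorem pvFlatMap_gA (X : List (String × Int × String)) :
    X.flatMap pvGA =
      ((X.map (fun t => (t.2.1, t.2.2))).filter (fun p => p.2 ≠ "")).map (fun p => p.2) := by
  induction X with
  | nil => rfl
  | cons t ts ih =>
    rw [List.flatMap_cons, List.map_cons, List.filter_cons]
    by_cases h : t.2.2 ≠ ""
    · simp only [pvGA, if_pos h, decide_eq_true h, if_true, List.map_cons]
      rw [ih]
      rfl
    · simp only [pvGA, if_neg h, decide_eq_false h, Bool.false_eq_true, if_false]
      rw [ih]
      rfl

theorem pvFlatMap_singleton {α β : Type} (f : α → β) (l : List α) :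
    l.flatMap (fun x => [f x]) = l.map f := by
  induction l with
  | nil => rfl
  | cons x t ih => rw [List.flatMap_cons, List.map_cons, ih]; rfl
def pvItems (rows : List (List (String × String))) : List (String × Int × String) :=
  rows.filterMap pvRow
def pvS (rows : List (List (String × String))) : List (String × Int × String) :=
  (pvItems rows).foldl (fun acc x => PySem.List.insertBy pvLt2 x acc) []
def pvF (s : List (String × Int × String)) (k : String) : String × String :=
  (k, PySem.Str.strip (PySem.Str.join " " ((s.filter (fun t => t.1 == k)).flatMap pvGA)))

theorem pvA_char (rows : List (List (String × String))) :
    parse_trocr_recognized_words rows =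
      (PySem.List.dedup ((pvS rows).map (fun t => t.1))).map (pvF (pvS rows)) := by
  unfold parse_trocr_recognized_words
  simp only []
  have h1 : rows.foldl (fun acc r =>
      let stem := PySem.Str.strip (PySem.Dict.getD ⟨r⟩ "image_stem" "")
      if stem = "" then acc
      else
        let v := PySem.Dict.getD (⟨r⟩ : PySem.Dict String String) "index" ""
        let idx_str := PySem.Str.strip (if v = "" then "0" else v)
        let idx := (PySem.Int.ofStr? idx_str).getD 0
        let text := PySem.Str.strip (PySem.Dict.getD (⟨r⟩ : PySem.Dict String String) "text" "")
        acc ++ [(stem, idx, text)]) [] = pvItems rows := by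
    have he : (fun (acc : List (String × Int × String)) (r : List (String × String)) =>
        let stem := PySem.Str.strip (PySem.Dict.getD ⟨r⟩ "image_stem" "")
        if stem = "" then acc
        else
          let v := PySem.Dict.getD (⟨r⟩ : PySem.Dict String String) "index" ""
          let idx_str := PySem.Str.strip (if v = "" then "0" else v)
          let idx := (PySem.Int.ofStr? idx_str).getD 0
          let text := PySem.Str.strip (PySem.Dict.getD (⟨r⟩ : PySem.Dict String String) "text" "")
          acc ++ [(stem, idx, text)]) =
        (fun acc r => acc ++ (pvRow r).toList) := by
      funext acc r
      exact pvStepItems_eq acc r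
    rw [he, pvFoldl_toList_eq_filterMap]
    rfl
  rw [h1]
  have h2 : PySem.List.sorted2 (pvItems rows) (fun t => t.1) (fun t => t.2.1) = pvS rows := rfl
  rw [h2]
  rw [pvFoldA_eq (pvS rows) PySem.Dict.empty (by exact List.nodup_nil)]
  have hnd : ((pvS rows).foldl (fun d t => d.modify t.1 [] (fun v => v ++ pvGA t)) PySem.Dict.empty).keys.Nodup := by
    exact pvNodup_keys_foldl_modify (fun t => t.1) pvGA (pvS rows) PySem.Dict.empty (by exact List.nodup_nil)
  rw [PySem.Dict.items_eq_map_keys _ hnd []]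
  rw [List.map_map]
  have h3 := pvKeys_foldl_modify (fun t : String × Int × String => t.1) pvGA (pvS rows)
  rw [h3]
  refine List.map_congr_left ?_
  intro k _
  have h4 := pvGetD_foldl_modify (fun t : String × Int × String => t.1) pvGA (pvS rows) PySem.Dict.empty k
  simp only [Function.comp]
  rw [h4]
  simp [pvF]

def pvG (items : List (String × Int × String)) (k : String) : String × String :=
  (k, PySem.Str.strip (PySem.Str.join " "
    (((PySem.List.sorted ((items.filter (fun t => t.1 == k)).map (fun t => (t.2.1, t.2.2)))
        (fun p => p.1)).filter (fun p => p.2 ≠ "")).map (fun p => p.2))))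

theorem pvB_char (rows : List (List (String × String))) :
    parse_trocr_recognized_words_alt rows =
      (PySem.List.sorted (PySem.List.dedup ((pvItems rows).map (fun t => t.1))) (fun k => k)).map
        (pvG (pvItems rows)) := by
  unfold parse_trocr_recognized_words_alt
  simp only []
  have he : (fun (d : PySem.Dict String (List (Int × String))) (r : List (String × String)) =>
      let stem := PySem.Str.strip (PySem.Dict.getD ⟨r⟩ "image_stem" "")
      if stem = "" then d
      else
        let v := PySem.Dict.getD (⟨r⟩ : PySem.Dict String String) "index" ""
        let idx_str := PySem.Str.strip (if v = "" then "0" else v)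
        let idx := (PySem.Int.ofStr? idx_str).getD 0
        let text := PySem.Str.strip (PySem.Dict.getD (⟨r⟩ : PySem.Dict String String) "text" "")
        d.modify stem [] (fun l => l ++ [(idx, text)])) =
      (fun d r => (pvRow r).elim d (fun t => d.modify t.1 [] (fun l => l ++ [(t.2.1, t.2.2)]))) := by
    funext d r
    exact pvStepB_eq d r
  rw [he, pvFoldl_elim_eq_filterMap]
  have hkeys := pvKeys_foldl_modify (fun t : String × Int × String => t.1)
    (fun t => [(t.2.1, t.2.2)]) (rows.filterMap pvRow)
  rw [hkeys]
  refine List.map_congr_left ?_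
  intro k _
  have h4 := pvGetD_foldl_modify (fun t : String × Int × String => t.1)
    (fun t => [(t.2.1, t.2.2)]) (rows.filterMap pvRow) PySem.Dict.empty k
  rw [h4, pvFlatMap_singleton (fun t : String × Int × String => (t.2.1, t.2.2))]
  simp [pvG, pvItems]

theorem pvLt2_false_le (a b : String × Int × String) (h : pvLt2 b a = false) : a.1 ≤ b.1 := by
  rw [Bool.eq_false_iff, Ne, pvLt2_iff] at h
  push_neg at h
  exact not_lt.mp h.1

theorem pvKeylist (rows : List (List (String × String))) :
    PySem.List.sorted (PySem.List.dedup ((pvItems rows).map (fun t => t.1))) (fun k => k) =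
      PySem.List.dedup ((pvS rows).map (fun t => t.1)) := by
  apply PySem.List.sorted_eq_of_perm_of_pairwise_lt
  · have hperm : (pvS rows).Perm (pvItems rows) :=
      PySem.List.sorted2_perm (pvItems rows) (fun t => t.1) (fun t => t.2.1) false
    refine (List.perm_ext_iff_of_nodup (PySem.List.nodup_dedup _) (PySem.List.nodup_dedup _)).mpr ?_
    intro a
    rw [PySem.List.mem_dedup, PySem.List.mem_dedup]
    exact (hperm.map (fun t => t.1)).mem_iff
  · apply pvDedup_pairwise_lt
    have hpw := pvPairwise_foldl_insertBy (pvItems rows) [] (by simp)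
    exact List.Pairwise.map (fun t => t.1) (fun a b h => pvLt2_false_le a b h) hpw

theorem pvPointwise (rows : List (List (String × String))) (k : String) :
    pvG (pvItems rows) k = pvF (pvS rows) k := by
  unfold pvG pvF
  have hfil : (pvS rows).filter (fun t => t.1 == k) =
      ((pvItems rows).filter (fun t => t.1 == k)).foldl
        (fun acc x => PySem.List.insertBy pvLt2 x acc) [] := by
    have h := pvFilter_foldl_insertBy pvLt2 (fun t => t.1 == k)
      (fun x ys hx => pvFilter_insertBy_neg pvLt2 _ x ys hx)
      (fun x ys hx hs => pvFilter_insertBy_pos pvLt2 _ pvLt2_comp x ys hx hs)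
      (fun x ys h => pvInsertBy_pairwise pvLt2 pvLt2_asymm pvLt2_trans x ys h)
      (pvItems rows) [] (by simp)
    simpa [pvS] using h
  have hclass : ((pvItems rows).filter (fun t => t.1 == k)).foldl
        (fun acc x => PySem.List.insertBy pvLt2 x acc) [] =
      ((pvItems rows).filter (fun t => t.1 == k)).foldl
        (fun acc x => PySem.List.insertBy (fun a b => decide (a.2.1 < b.2.1)) x acc) [] :=
    pvFoldl_class_congr k _ [] (fun x hx => by simpa using (List.of_mem_filter hx)) (by simp)
  have hmap : PySem.List.sorted (((pvItems rows).filter (fun t => t.1 == k)).map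
        (fun t => (t.2.1, t.2.2))) (fun p => p.1) =
      (((pvItems rows).filter (fun t => t.1 == k)).foldl
        (fun acc x => PySem.List.insertBy (fun a b => decide (a.2.1 < b.2.1)) x acc) []).map
        (fun t => (t.2.1, t.2.2)) := by
    have h := pvFoldl_insertBy_map (fun a b : String × Int × String => decide (a.2.1 < b.2.1))
      (fun a b : Int × String => decide (a.1 < b.1)) (fun t => (t.2.1, t.2.2)) (fun a b => rfl)
      ((pvItems rows).filter (fun t => t.1 == k)) []
    simpa using h
  rw [hmap, ← hclass, ← hfil, ← pvFlatMap_gA]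

theorem pvMain (rows : List (List (String × String))) :
    parse_trocr_recognized_words rows = parse_trocr_recognized_words_alt rows := by
  rw [pvA_char, pvB_char, pvKeylist]
  exact (List.map_congr_left (fun k _ => pvPointwise rows k)).symm

-- ===== VERDICT (by name: the statement is the Claim_ definition above) =====
theorem parse_trocr_recognized_words_spec : Claim_equal_parse_trocr_recognized_words := by
  intro rows _
  show parse_trocr_recognized_words rows = parse_trocr_recognized_words_alt rows
  exact pvMain rows
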